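-- pv_equiv track=rewrite | github.com/dave-8888/Spider_XHS | collector_service.py | _markdown_code_block
-- ===== SOURCE A (Python) =====
-- from typing import Any, Callable, Dict, List, Optional, Tuple
--
-- def _markdown_code_block(text: str, info: str = "text") -> List[str]:
--     body = str(text or "").strip()
--     if not body:
--         return ["未记录。"]
--     fence = "```"
--     while fence in body:
--         fence += "`"
--     return [f"{fence}{info}", body, fence]
-- ===== SOURCE B (Python) =====
-- def _markdown_code_block(text: str, info: str = "text"):
--     body = str(text or "").strip()
--     if not body:
--         return ["未记录。"]
--     run = best = 0
--     for ch in body: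
--         if ch == '`':
--             run += 1
--             if run > best:
--                 best = run
--         else:
--             run = 0
--     fence = '`' * max(3, best + 1)
--     return [f"{fence}{info}", body, fence]
-- ===== Notes on version B (the rewrite author's own statement) =====
-- stated objective: alternative
-- what changed: Replaces the growing-fence repeated substring-search loop with one linear scan computing the longest backtick run and the closed-form fence length max(3, run+1); removes the worst-case quadratic rescans but is not measurably faster on typical inputs.
import Mathlib
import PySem

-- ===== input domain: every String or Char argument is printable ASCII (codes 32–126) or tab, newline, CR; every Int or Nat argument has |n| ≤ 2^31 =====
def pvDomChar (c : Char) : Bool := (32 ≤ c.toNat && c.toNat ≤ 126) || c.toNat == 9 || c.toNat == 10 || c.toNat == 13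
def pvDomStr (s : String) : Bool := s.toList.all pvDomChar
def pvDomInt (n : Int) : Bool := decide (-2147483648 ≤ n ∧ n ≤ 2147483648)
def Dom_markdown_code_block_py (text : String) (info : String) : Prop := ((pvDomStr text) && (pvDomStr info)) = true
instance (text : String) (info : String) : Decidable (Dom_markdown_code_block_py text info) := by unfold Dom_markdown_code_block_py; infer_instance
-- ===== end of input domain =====

-- B replaces A's growing-fence repeated substring-search loop with one linear scan for the
-- longest backtick run and the closed-form fence '`' * max(3, run+1); same return value.

-- ===== PORT A =====
-- while fence in body: fence += '`'   (fuel = body.length + 1 iterations always suffices: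
-- a fence longer than body cannot be a substring of body)
def pvAgrow (body : List Char) (fence : List Char) (fuel : Nat) : List Char :=
  match fuel with
  | 0 => fence
  | fuel + 1 =>
      if PySem.Chars.isIn fence body then pvAgrow body (fence ++ ['`']) fuel else fence

def markdown_code_block_py (text : String) (info : String) : List String :=
  -- body = str(text or "").strip()
  let body := PySem.Chars.strip (if text.toList.isEmpty then [] else text.toList)
  if body = [] then ["未记录。"]
  else
    let fence := pvAgrow body ['`', '`', '`'] (body.length + 1)
    [String.ofList (fence ++ info.toList), String.ofList body, String.ofList fence]

-- ===== PORT B =====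
-- the for-loop of Source B: run/best accumulators over the characters of body
def pvMaxRun (run : Nat) (best : Nat) : List Char → Nat
  | [] => best
  | c :: rest =>
      if c = '`' then pvMaxRun (run + 1) (max best (run + 1)) rest
      else pvMaxRun 0 best rest

def markdown_code_block_py_alt (text : String) (info : String) : List String :=
  let body := PySem.Chars.strip (if text.toList.isEmpty then [] else text.toList)
  if body = [] then ["未记录。"]
  else
    let best := pvMaxRun 0 0 body
    let fence := List.replicate (max 3 (best + 1)) '`'
    [String.ofList (fence ++ info.toList), String.ofList body, String.ofList fence]

-- ===== PRECONDITION & SPEC =====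
def Spec_markdown_code_block_py (text : String) (info : String) (out : List String) : Prop := out = markdown_code_block_py_alt text info
instance (text : String) (info : String) (out : List String) : Decidable (Spec_markdown_code_block_py text info out) := by unfold Spec_markdown_code_block_py; infer_instance

-- ===== CLAIM (what is proved, stated in full; the proofs are below) =====
def Claim_equal_markdown_code_block_py : Prop := ∀ (text : String) (info : String), Dom_markdown_code_block_py text info → Spec_markdown_code_block_py text info (markdown_code_block_py text info)

-- ===== LEMMAS AND PROOFS =====

-- length of the leading run of backticks
def pvHr : List Char → Nat
  | [] => 0
  | c :: t => if c = '`' then pvHr t + 1 else 0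

-- length of the longest run of backticks (pure spec)
def pvMR : List Char → Nat
  | [] => 0
  | c :: t => if c = '`' then max (pvHr t + 1) (pvMR t) else pvMR t

theorem pvHr_le_len (l : List Char) : pvHr l ≤ l.length := by
  induction l with
  | nil => simp [pvHr]
  | cons c t ih =>
      by_cases h : c = '`'
      · simp [pvHr, h]; omega
      · simp [pvHr, h]

theorem pvHr_le_pvMR (l : List Char) : pvHr l ≤ pvMR l := by
  induction l with
  | nil => simp [pvHr, pvMR]
  | cons c t ih =>
      by_cases h : c = '`'
      · simp [pvHr, pvMR, h]
      · simp [pvHr, pvMR, h]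

theorem pvMR_le_len (l : List Char) : pvMR l ≤ l.length := by
  induction l with
  | nil => simp [pvMR]
  | cons c t ih =>
      have := pvHr_le_len t
      by_cases h : c = '`' <;> simp [pvMR, h] <;> omega

theorem replicate_prefix_iff (m : Nat) (l : List Char) :
    List.replicate m '`' <+: l ↔ m ≤ pvHr l := by
  induction l generalizing m with
  | nil =>
      constructor
      · intro h
        have := h.length_le
        simp [pvHr] at this ⊢
        omega
      · intro h
        simp [pvHr] at h
        simp [h]
  | cons c t ih =>
      cases m with
      | zero => simp
      | succ m =>
          by_cases hc : c = '`'
          · subst hc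
            rw [List.replicate_succ]
            constructor
            · intro h
              have h' : List.replicate m '`' <+: t := by
                rcases h with ⟨s, hs⟩
                exact ⟨s, by simpa using hs⟩
              have := (ih m).mp h'
              simp [pvHr]; omega
            · intro h
              simp [pvHr] at h
              have h' := (ih m).mpr (by omega)
              rcases h' with ⟨s, hs⟩
              exact ⟨s, by simp [hs]⟩
          · constructor
            · intro h
              rcases h with ⟨s, hs⟩
              rw [List.replicate_succ] at hs
              simp at hs
              exact absurd hs.1.symm hc
            · intro h
              simp [pvHr, hc] at h
  
theorem replicate_infix_iff (k : Nat) (l : List Char) :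
    List.replicate k '`' <:+: l ↔ k ≤ pvMR l := by
  induction l with
  | nil =>
      constructor
      · intro h
        have := h.length_le
        simpa [pvMR] using this
      · intro h
        simp [pvMR] at h
        simp [h]
  | cons c t ih =>
      rw [List.infix_cons_iff]
      by_cases hc : c = '`'
      · subst hc
        constructor
        · rintro (h | h)
          · have := (replicate_prefix_iff k ('`' :: t)).mp h
            simp [pvHr, pvMR] at this ⊢
            have := pvHr_le_pvMR t
            omega
          · have := ih.mp h
            simp [pvMR]; omega
        · intro h
          simp [pvMR] at h
          rcases h with h | h
          · exact Or.inl ((replicate_prefix_iff k ('`' :: t)).mpr (by simp [pvHr]; omega))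
          · exact Or.inr (ih.mpr h)
      · constructor
        · rintro (h | h)
          · have := (replicate_prefix_iff k (c :: t)).mp h
            simp [pvHr, hc] at this
            simp [this, pvMR]
          · simpa [pvMR, hc] using ih.mp h
        · intro h
          simp [pvMR, hc] at h
          exact Or.inr (ih.mpr h)

theorem pvMaxRun_eq (l : List Char) (run best : Nat) (h : run ≤ best) :
    pvMaxRun run best l = max best (max (run + pvHr l) (pvMR l)) := by
  induction l generalizing run best with
  | nil => simp [pvMaxRun, pvHr, pvMR]; omega
  | cons c t ih =>
      by_cases hc : c = '`'
      · subst hc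
        rw [pvMaxRun, if_pos rfl, ih _ _ (by omega)]
        simp [pvHr, pvMR]
        omega
      · rw [pvMaxRun, if_neg hc, ih _ _ (by omega)]
        have := pvHr_le_pvMR t
        simp [pvHr, pvMR, hc]
        omega

theorem pvAgrow_eq (body : List Char) (k fuel : Nat) (h : pvMR body < k + fuel) :
    pvAgrow body (List.replicate k '`') fuel = List.replicate (max k (pvMR body + 1)) '`' := by
  induction fuel generalizing k with
  | zero =>
      have : max k (pvMR body + 1) = k := by omega
      simp [pvAgrow, this]
  | succ fuel ih =>
      rw [pvAgrow]
      by_cases hin : PySem.Chars.isIn (List.replicate k '`') body = true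
      · have hk : k ≤ pvMR body :=
          (replicate_infix_iff k body).mp ((PySem.Chars.isIn_iff_infix _ _).mp hin)
        rw [if_pos hin, show List.replicate k '`' ++ ['`'] = List.replicate (k + 1) '`' by
              simp [List.replicate_succ'],
            ih (k + 1) (by omega)]
        congr 1
        omega
      · have hk : ¬ k ≤ pvMR body := fun hle =>
          hin ((PySem.Chars.isIn_iff_infix _ _).mpr ((replicate_infix_iff k body).mpr hle))
        rw [if_neg hin]
        congr 1
        omega

-- ===== VERDICT (by name: the statement is the Claim_ definition above) =====
theorem markdown_code_block_py_spec : Claim_equal_markdown_code_block_py := by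
  intro text info _
  unfold Spec_markdown_code_block_py markdown_code_block_py markdown_code_block_py_alt
  set body := PySem.Chars.strip (if text.toList.isEmpty then [] else text.toList) with hb
  by_cases hbe : body = []
  · simp [hbe]
  · rw [if_neg hbe, if_neg hbe]
    have hfuel : pvMR body < 3 + (body.length + 1) := by
      have := pvMR_le_len body; omega
    have hfence : pvAgrow body ['`', '`', '`'] (body.length + 1)
        = List.replicate (max 3 (pvMR body + 1)) '`' := by
      have := pvAgrow_eq body 3 (body.length + 1) hfuel
      simpa using this
    have hrun : pvMaxRun 0 0 body = pvMR body := by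
      rw [pvMaxRun_eq body 0 0 (le_refl 0)]
      have := pvHr_le_pvMR body
      omega
    rw [hfence, hrun]
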